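-- pv_equiv track=rewrite | github.com/arunnaudiyal786/ele-sdlc-backend | app/utils/json_repair.py | _fix_missing_colons
-- ===== SOURCE A (Python) =====
-- def _fix_missing_colons(text: str) -> str:
--     """Fix missing colons between JSON keys and values.
--
--     LLMs sometimes generate {"key" "value"} instead of {"key": "value"}.
--     This detects key-value pairs where the colon is missing and inserts it.
--     """
--     # Pattern: quoted string followed by whitespace and then a value (without colon)
--     # Value can be: another string, number, boolean, null, object, or array
--     # We need to ensure we're in an object context (after { or ,) not array context
--
--     result = []
--     i = 0
--     in_string = False
--     escape_next = False
--
--     while i < len(text):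
--         char = text[i]
--
--         # Handle escape sequences
--         if escape_next:
--             result.append(char)
--             escape_next = False
--             i += 1
--             continue
--
--         if char == '\\' and in_string:
--             result.append(char)
--             escape_next = True
--             i += 1
--             continue
--
--         # Track string boundaries
--         if char == '"':
--             if not in_string:
--                 in_string = True
--                 result.append(char)
--                 i += 1
--                 continue
--             else:
--                 # End of string - check if this might be a key missing its colon
--                 in_string = False
--                 result.append(char)
--                 i += 1
--
--                 # Look ahead for missing colon
--                 # Skip whitespace
--                 j = i
--                 while j < len(text) and text[j] in ' \t\n\r':
--                     j += 1
--
--                 if j < len(text):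
--                     next_char = text[j]
--                     # If next non-whitespace is a value start (not : or , or } or ])
--                     # then we might need to insert a colon
--                     if next_char in '"0123456789-tfn{[':
--                         # Check it's not already properly followed by colon
--                         # Look back to see if we're in object context (after { or ,)
--                         lookback = ''.join(result).rstrip()
--                         if lookback:
--                             # Find the last structural character before this string
--                             for k in range(len(lookback) - 1, -1, -1):
--                                 if lookback[k] in '{[:,':
--                                     # After { or , = this is likely a key
--                                     # After : = this is a value
--                                     # After [ = array element
--                                     if lookback[k] in '{,':
--                                         # This was a key, insert colon
--                                         result.append(':')
--                                     break
--                 continue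
--
--         result.append(char)
--         i += 1
--
--     return ''.join(result)
-- ===== SOURCE B (Python) =====
-- def _fix_missing_colons(text: str) -> str:
--     """Fix missing colons between JSON keys and values.
--
--     One pass: the last structural character ('{', '[', ':', ',') emitted so far
--     is tracked incrementally, so no rejoin/rescan of the output is needed (single pass).
--     """
--     out = []
--     in_string = False
--     escape_next = False
--     last_struct = ''
--     n = len(text)
--     i = 0
--     while i < n:
--         ch = text[i]
--         i += 1
--         if escape_next:
--             escape_next = False
--         elif in_string:
--             if ch == '\\':
--                 escape_next = True
--             elif ch == '"':
--                 in_string = False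
--                 out.append(ch)
--                 # peek past whitespace for the start of a value
--                 j = i
--                 while j < n and text[j] in ' \t\n\r':
--                     j += 1
--                 if j < n and text[j] in '"0123456789-tfn{[' and last_struct in ('{', ','):
--                     out.append(':')
--                     last_struct = ':'
--                 continue
--         elif ch == '"':
--             in_string = True
--         out.append(ch)
--         if ch in '{[:,':
--             last_struct = ch
--     return ''.join(out)
-- ===== Notes on version B (the rewrite author's own statement) =====
-- stated objective: alternative
-- what changed: Instead of rejoining and backward-rescanning the whole output buffer at every closing quote, B tracks the last emitted structural character ('{','[',':',',') incrementally in a single pass.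
import Mathlib
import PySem

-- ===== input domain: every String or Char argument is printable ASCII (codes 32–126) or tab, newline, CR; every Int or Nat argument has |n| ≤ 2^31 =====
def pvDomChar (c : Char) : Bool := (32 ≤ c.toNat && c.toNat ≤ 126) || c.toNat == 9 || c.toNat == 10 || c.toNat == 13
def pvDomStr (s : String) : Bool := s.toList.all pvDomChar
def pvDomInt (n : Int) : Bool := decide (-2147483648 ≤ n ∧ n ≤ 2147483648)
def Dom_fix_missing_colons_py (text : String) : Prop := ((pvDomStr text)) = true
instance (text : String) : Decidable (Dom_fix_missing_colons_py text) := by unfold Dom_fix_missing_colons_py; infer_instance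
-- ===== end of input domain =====

-- B replaces A's per-closing-quote rejoin-and-backward-rescan of the output buffer by an
-- incrementally tracked last structural character (objective: alternative single-pass algorithm).

-- character classes shared by both Python sources (their literal character sets)
def pvWS (c : Char) : Bool := c == ' ' || c == '\t' || c == '\n' || c == '\r'
def pvStruct (c : Char) : Bool := c == '{' || c == '[' || c == ':' || c == ','
def pvValueStart (c : Char) : Bool := "\"0123456789-tfn{[".toList.contains c

-- ===== PORT A =====
-- lookback = ''.join(result).rstrip(); if lookback: for k from the end, first char in '{[:,' decides
def pvLookA (res : List Char) : Bool :=
  if PySem.Chars.rstrip res ≠ [] then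
    match (PySem.Chars.rstrip res).reverse.find? pvStruct with
    | some k => k == '{' || k == ','
    | none => false
  else false

def pvFixA : List Char → List Char → Bool → Bool → List Char
  | [], res, _, _ => res
  | c :: rest, res, instr, esc =>
    if esc then pvFixA rest (res ++ [c]) instr false
    else if c == '\\' && instr then pvFixA rest (res ++ [c]) instr true
    else if c == '"' then
      if !instr then pvFixA rest (res ++ [c]) true false
      else
        -- end of string: append the quote, peek past whitespace, then rescan the result
        let res' := res ++ [c]
        let res'' :=
          match rest.find? (fun x => !pvWS x) with
          | some nc => if pvValueStart nc && pvLookA res' then res' ++ [':'] else res'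
          | none => res'
        pvFixA rest res'' false false
    else pvFixA rest (res ++ [c]) instr false

def fix_missing_colons_py (text : String) : String :=
  String.ofList (pvFixA text.toList [] false false)

-- ===== PORT B =====
-- one pass; `last` is the last structural character appended so far
def pvFixB : List Char → List Char → Bool → Bool → Option Char → List Char
  | [], res, _, _, _ => res
  | c :: rest, res, instr, esc, last =>
    if esc then
      pvFixB rest (res ++ [c]) instr false (if pvStruct c then some c else last)
    else if instr then
      if c == '\\' then pvFixB rest (res ++ [c]) instr true (if pvStruct c then some c else last)
      else if c == '"' then
        -- end of string: peek past whitespace and consult the tracked character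
        match rest.find? (fun x => !pvWS x) with
        | some nc =>
          if pvValueStart nc && (last == some '{' || last == some ',') then
            pvFixB rest (res ++ [c, ':']) false false (some ':')
          else pvFixB rest (res ++ [c]) false false last
        | none => pvFixB rest (res ++ [c]) false false last
      else pvFixB rest (res ++ [c]) instr false (if pvStruct c then some c else last)
    else if c == '"' then
      pvFixB rest (res ++ [c]) true false (if pvStruct c then some c else last)
    else
      pvFixB rest (res ++ [c]) instr false (if pvStruct c then some c else last)

def fix_missing_colons_py_alt (text : String) : String :=
  String.ofList (pvFixB text.toList [] false false none)

-- ===== PRECONDITION & SPEC =====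
def Spec_fix_missing_colons_py (text : String) (out : String) : Prop := out = fix_missing_colons_py_alt text
instance (text : String) (out : String) : Decidable (Spec_fix_missing_colons_py text out) := by unfold Spec_fix_missing_colons_py; infer_instance

-- ===== CLAIM (what is proved, stated in full; the proofs are below) =====
def Claim_equal_fix_missing_colons_py : Prop := ∀ (text : String), Dom_fix_missing_colons_py text → Spec_fix_missing_colons_py text (fix_missing_colons_py text)

-- ===== LEMMAS AND PROOFS =====

-- B's tracked character = the last structural character of A's result buffer
def pvLast (res : List Char) : Option Char := res.reverse.find? pvStruct

lemma ws_not_struct (c : Char) (h : PySem.Chars.isspace c = true) : pvStruct c = false := by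
  by_contra hs
  have hs' : pvStruct c = true := by simpa using hs
  simp [pvStruct] at hs'
  rcases hs' with ((h1|h1)|h1)|h1 <;> subst h1 <;> exact absurd h (by decide)

lemma find?_dropWhile (l : List Char) :
    (l.dropWhile PySem.Chars.isspace).find? pvStruct = l.find? pvStruct := by
  induction l with
  | nil => rfl
  | cons c t ih =>
    by_cases h : PySem.Chars.isspace c = true
    · simp [List.dropWhile, h, List.find?, ws_not_struct c h, ih]
    · simp [List.dropWhile, h, List.find?]

lemma rstrip_find (res : List Char) :
    (PySem.Chars.rstrip res).reverse.find? pvStruct = pvLast res := by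
  show ((res.reverse.dropWhile PySem.Chars.isspace).reverse).reverse.find? pvStruct = _
  rw [List.reverse_reverse, find?_dropWhile]; rfl

lemma pvLookA_eq (res : List Char) :
    pvLookA res = (pvLast res == some '{' || pvLast res == some ',') := by
  unfold pvLookA
  split
  · rw [rstrip_find]; rcases pvLast res with _ | k <;> simp
  · next hemp =>
    simp at hemp
    have : pvLast res = none := by rw [← rstrip_find, hemp]; rfl
    simp [this]

lemma pvLast_append (res : List Char) (c : Char) :
    pvLast (res ++ [c]) = if pvStruct c then some c else pvLast res := by
  simp [pvLast, List.find?]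
  split <;> simp_all

lemma pvFix_eq (cs : List Char) : ∀ (res : List Char) (instr esc : Bool),
    pvFixB cs res instr esc (pvLast res) = pvFixA cs res instr esc := by
  induction cs with
  | nil => intro res instr esc; rfl
  | cons c rest ih =>
    intro res instr esc
    rw [pvFixB, pvFixA]
    cases esc with
    | true => simp only [if_pos trivial, ← pvLast_append, ih]
    | false =>
      simp only [Bool.false_eq_true, if_false]
      cases instr with
      | false =>
        have hbs : (c == '\\' && false) = false := by simp
        rw [hbs]
        simp only [Bool.false_eq_true, if_false, Bool.not_false, if_pos trivial]
        by_cases hq : (c == '"') = true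
        · rw [if_pos hq, if_pos hq, ← pvLast_append, ih]
        · rw [if_neg hq, if_neg hq, ← pvLast_append, ih]
      | true =>
        by_cases hbsl : (c == '\\') = true
        · rw [if_pos hbsl]
          have h2 : (c == '\\' && true) = true := by simp [hbsl]
          rw [h2]
          simp only [if_pos trivial]
          rw [← pvLast_append, ih]
        · rw [if_neg hbsl]
          have h2 : (c == '\\' && true) = false := by simp [hbsl]
          rw [h2]
          simp only [Bool.false_eq_true, if_false]
          by_cases hq : (c == '"') = true
          · rw [if_pos hq, if_pos hq]
            have hc : c = '"' := by simpa using hq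
            subst hc
            simp only [Bool.not_true, Bool.false_eq_true, if_false]
            have hstq : pvStruct '"' = false := by decide
            rcases hfind : rest.find? (fun x => !pvWS x) with _ | nc
            · rw [← ih (res ++ ['"']) false false, pvLast_append, hstq]; simp
            · rw [pvLookA_eq, pvLast_append, hstq]
              simp only [Bool.false_eq_true, if_false]
              by_cases hcond : (pvValueStart nc && (pvLast res == some '{' || pvLast res == some ',')) = true
              · rw [if_pos hcond, if_pos hcond]
                have hsplit : res ++ ['"', ':'] = (res ++ ['"']) ++ [':'] := by simp
                rw [hsplit, ← ih ((res ++ ['"']) ++ [':']) false false, pvLast_append]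
                norm_num [pvStruct]
              · rw [if_neg hcond, if_neg hcond, ← ih (res ++ ['"']) false false,
                  pvLast_append, hstq]
                simp
          · simp only [if_neg hq, if_pos trivial, ← pvLast_append, ih]

-- ===== VERDICT (by name: the statement is the Claim_ definition above) =====
theorem fix_missing_colons_py_spec : Claim_equal_fix_missing_colons_py := by
  intro text _
  unfold Spec_fix_missing_colons_py fix_missing_colons_py fix_missing_colons_py_alt
  rw [show (none : Option Char) = pvLast [] from rfl, pvFix_eq]
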